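-- pv_equiv track=rewrite | github.com/mehese/sicp | chapter_5/5.5.Compilation/ex_5.51/scheme_prelims.py | _get_paren_span
-- ===== SOURCE A (Python) =====
-- def _get_paren_span(expr):
--     if '(' not in expr[0]:
--         return 1 # Car is an atom
--     else:
--         open_parens = 0
--         num_tokens = 0
--         # The number of tokens in car is the point where
--         #  all the open parens are closed
--         for token in expr:
--             num_tokens += 1
--
--             if token in ('(', "'("):
--                 open_parens += 1
--             elif token == ')':
--                 open_parens -= 1
--             if open_parens == 0:
--                 break
--         return num_tokens
-- ===== SOURCE B (Python) =====
-- def _delta(token):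
--     if token in ('(', "'("):
--         return 1
--     if token == ')':
--         return -1
--     return 0
--
--
-- def _first_balance(tokens, depth):
--     """1-based position of the first token where the running depth hits 0,
--     or None if it never does; position built on the way out of the recursion."""
--     if not tokens:
--         return None
--     d = depth + _delta(tokens[0])
--     if d == 0:
--         return 1
--     r = _first_balance(tokens[1:], d)
--     return None if r is None else r + 1
--
--
-- def _get_paren_span(expr):
--     if '(' in expr[0]:
--         pos = _first_balance(expr, 0)
--         return len(expr) if pos is None else pos
--     else:
--         return 1  # Car is an atom
-- ===== Notes on version B (the rewrite author's own statement) =====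
-- stated objective: alternative
-- what changed: Replaces A's forward accumulator loop (token counter + open-paren counter with an early break) by a structural recursion: a helper returns the first balance position as an Optional built on the way back out (1 + recursive result), with len(expr) as the fallback when no balance point exists.
import Mathlib
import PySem

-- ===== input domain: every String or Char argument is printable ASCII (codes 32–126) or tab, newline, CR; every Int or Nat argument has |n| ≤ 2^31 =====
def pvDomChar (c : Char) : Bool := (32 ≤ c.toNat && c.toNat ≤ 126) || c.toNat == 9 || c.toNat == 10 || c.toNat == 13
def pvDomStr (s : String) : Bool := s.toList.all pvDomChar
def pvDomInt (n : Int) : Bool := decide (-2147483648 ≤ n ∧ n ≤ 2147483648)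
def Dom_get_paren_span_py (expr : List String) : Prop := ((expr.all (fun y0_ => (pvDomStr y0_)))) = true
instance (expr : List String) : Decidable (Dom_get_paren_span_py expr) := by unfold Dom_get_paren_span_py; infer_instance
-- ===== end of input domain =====

-- B restructures A's forward accumulator loop into a back-building Optional recursion; same values (alternative decomposition, no speed claim).

-- ===== PORT A =====
-- A: one accumulator loop counting tokens and open parens, breaking when opens hit 0.
def pvA_loop : List String → Int → Int → Int
  | [], _, num => num
  | t :: rest, opens, num =>
    let num' := num + 1
    let opens' := if t = "(" ∨ t = "'(" then opens + 1
                  else if t = ")" then opens - 1 else opens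
    if opens' = 0 then num' else pvA_loop rest opens' num'

def get_paren_span_py (expr : List String) : Int :=
  match PySem.List.pyGet? expr 0 with
  | none => 0  -- expr[0] raises IndexError on []; excluded by Pre_
  | some first =>
    if !(PySem.Str.isIn "(" first) then 1
    else pvA_loop expr 0 0

-- ===== PORT B =====
-- B: token → depth delta.
def pvB_delta (t : String) : Int :=
  if t = "(" ∨ t = "'(" then 1 else if t = ")" then -1 else 0

-- B: 1-based position of the first token where the running depth hits 0 (None if never),
-- the position assembled on the way back out of the recursion (r + 1).
def pvB_firstBalance : List String → Int → Option Int
  | [], _ => none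
  | t :: rest, depth =>
    let d := depth + pvB_delta t
    if d = 0 then some 1
    else (pvB_firstBalance rest d).map (· + 1)

def get_paren_span_py_alt : List String → Int
  | [] => 0  -- expr[0] raises IndexError on []; excluded by Pre_
  | first :: rest =>
    if PySem.Str.isIn "(" first then
      match pvB_firstBalance (first :: rest) 0 with
      | none => ((first :: rest).length : Int)
      | some pos => pos
    else 1  -- Car is an atom

-- ===== PRECONDITION & SPEC =====
-- Pre_ excludes only the empty list, on which expr[0] raises IndexError in both A and B.
def Pre_get_paren_span_py (expr : List String) : Prop := expr ≠ []
instance (expr : List String) : Decidable (Pre_get_paren_span_py expr) := by unfold Pre_get_paren_span_py; infer_instance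
def pvWitness_get_paren_span_py : List String := ["(", "x", ")"]

def Spec_get_paren_span_py (expr : List String) (out : Int) : Prop := out = get_paren_span_py_alt expr
instance (expr : List String) (out : Int) : Decidable (Spec_get_paren_span_py expr out) := by unfold Spec_get_paren_span_py; infer_instance

-- ===== CLAIM (what is proved, stated in full; the proofs are below) =====
def Claim_equal_get_paren_span_py : Prop := ∀ (expr : List String), Dom_get_paren_span_py expr → Pre_get_paren_span_py expr → Spec_get_paren_span_py expr (get_paren_span_py expr)

-- ===== LEMMAS AND PROOFS =====

-- A's break-at-zero loop equals "n + first balance position, else n + length".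
theorem pvA_loop_eq_firstBalance (xs : List String) (d n : Int) :
    pvA_loop xs d n = n + ((pvB_firstBalance xs d).getD (xs.length : Int)) := by
  induction xs generalizing d n with
  | nil => simp [pvA_loop, pvB_firstBalance]
  | cons t rest ih =>
    simp only [pvA_loop, pvB_firstBalance]
    have hf : (if t = "(" ∨ t = "'(" then d + 1 else if t = ")" then d - 1 else d)
        = d + pvB_delta t := by
      unfold pvB_delta; split_ifs <;> ring
    rw [hf]
    by_cases h0 : d + pvB_delta t = 0
    · rw [if_pos h0, if_pos h0]; simp
    · rw [if_neg h0, if_neg h0, ih]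
      cases pvB_firstBalance rest (d + pvB_delta t) <;>
        simp only [Option.map_some, Option.map_none, Option.getD, List.length_cons] <;>
        push_cast <;> ring

-- ===== VERDICT (by name: the statement is the Claim_ definition above) =====
theorem get_paren_span_py_spec : Claim_equal_get_paren_span_py := by
  intro expr _ hpre
  unfold Spec_get_paren_span_py get_paren_span_py get_paren_span_py_alt
  cases expr with
  | nil => exact absurd rfl hpre
  | cons t rest =>
    simp only [PySem.List.pyGet?_zero_cons]
    by_cases hg : PySem.Str.isIn "(" t = true
    · rw [hg]
      simp only [Bool.not_true, Bool.false_eq_true, if_false, if_true]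
      rw [pvA_loop_eq_firstBalance]
      cases pvB_firstBalance (t :: rest) 0 <;> simp
    · simp only [Bool.not_eq_true] at hg
      rw [hg]
      simp
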